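-- pv_equiv track=rewrite | github.com/Koveh/ttl-converter | test_new.py | parse_statement
-- ===== SOURCE A (Python) =====
-- from typing import Iterator, Tuple, Dict, List
--
-- def parse_statement(statement: str) -> Tuple[str, List[List[str]]]:
--     parts = statement.split()
--     subject = parts[0]
--     predicates = []
--     current_predicate = []
--
--     for part in parts[1:]:
--         if part in ('a', 'wdt:', 'p:') or part.startswith(('<', 'wdt:', 'p:')):
--             if current_predicate:
--                 predicates.append(current_predicate)
--             current_predicate = [part]
--         else:
--             current_predicate.append(part)
--
--     if current_predicate:
--         predicates.append(current_predicate)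
--
--     return subject, predicates
-- ===== SOURCE B (Python) =====
-- def parse_statement(statement):
--     parts = statement.split()
--     subject = parts[0]
--     pending, groups = [], []
--     for tok in reversed(parts[1:]):
--         if tok == 'a' or tok.startswith(('<', 'wdt:', 'p:')):
--             pending, groups = [], [[tok] + pending] + groups
--         else:
--             pending, groups = [tok] + pending, groups
--     return subject, ([pending] + groups if pending else groups)
-- ===== Notes on version B (the rewrite author's own statement) =====
-- stated objective: alternative
-- what changed: Replaces A's forward accumulator with flush-on-start by a single backward pass keeping (pending tokens before the next start, groups already formed), prepending instead of appending; Pre_ only excludes whitespace-only/empty strings, on which both A and B raise IndexError.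
import Mathlib
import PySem

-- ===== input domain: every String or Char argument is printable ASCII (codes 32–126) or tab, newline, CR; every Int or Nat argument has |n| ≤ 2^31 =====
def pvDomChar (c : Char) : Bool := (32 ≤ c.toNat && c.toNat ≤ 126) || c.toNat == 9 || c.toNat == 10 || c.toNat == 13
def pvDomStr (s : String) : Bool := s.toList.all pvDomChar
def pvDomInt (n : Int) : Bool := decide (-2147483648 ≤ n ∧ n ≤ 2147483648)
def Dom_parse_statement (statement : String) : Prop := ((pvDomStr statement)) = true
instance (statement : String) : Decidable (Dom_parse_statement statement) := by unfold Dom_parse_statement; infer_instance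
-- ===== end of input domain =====

-- B differs from A: backward fold with (pending, groups) state instead of forward accumulator with flush; equivalence proved on non-empty token lists.
-- ===== PORT A =====
def psStartTok (part : String) : Bool :=
  (part == "a" || part == "wdt:" || part == "p:") ||
  (PySem.Str.startswith part "<" || PySem.Str.startswith part "wdt:" || PySem.Str.startswith part "p:")

def psLoopA : List String → List (List String) → List String → List (List String)
  | [], preds, cur => if cur ≠ [] then preds ++ [cur] else preds
  | t :: ts, preds, cur =>
    if psStartTok t then
      psLoopA ts (if cur ≠ [] then preds ++ [cur] else preds) [t]
    else
      psLoopA ts preds (cur ++ [t])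

def parse_statement (statement : String) : String × List (List String) :=
  let parts := PySem.Str.split₀ statement
  let subject := (PySem.List.pyGet? parts 0).getD ""   -- parts[0]; Pre_ excludes the IndexError case
  (subject, psLoopA (PySem.List.slice parts (some 1) none) [] [])

-- ===== PORT B =====
def psStepB (tok : String) (st : List String × List (List String)) : List String × List (List String) :=
  if psStartTok tok then ([], (tok :: st.1) :: st.2) else (tok :: st.1, st.2)

def parse_statement_alt (statement : String) : String × List (List String) :=
  let parts := PySem.Str.split₀ statement
  let subject := (PySem.List.pyGet? parts 0).getD ""   -- parts[0]; Pre_ excludes the IndexError case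
  let st := (PySem.List.slice parts (some 1) none).foldr psStepB ([], [])
  (subject, if st.1 ≠ [] then st.1 :: st.2 else st.2)

-- ===== PRECONDITION & SPEC =====
-- Pre_ excludes exactly the inputs with no whitespace-separated token (empty/whitespace-only), where A raises IndexError on parts[0] (and B does too).
def Pre_parse_statement (statement : String) : Prop := PySem.Str.split₀ statement ≠ []
instance (statement : String) : Decidable (Pre_parse_statement statement) := by unfold Pre_parse_statement; infer_instance
def pvWitness_parse_statement : String := "s a b wdt:p c"
def Spec_parse_statement (statement : String) (out : String × List (List String)) : Prop := out = parse_statement_alt statement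
instance (statement : String) (out : String × List (List String)) : Decidable (Spec_parse_statement statement out) := by unfold Spec_parse_statement; infer_instance

-- ===== CLAIM (what is proved, stated in full; the proofs are below) =====
def Claim_equal_parse_statement : Prop := ∀ (statement : String), Dom_parse_statement statement → Pre_parse_statement statement → Spec_parse_statement statement (parse_statement statement)

-- ===== LEMMAS AND PROOFS =====
theorem psLoopA_ne (ts : List String) (preds : List (List String)) (cur : List String)
    (h : cur ≠ []) :
    psLoopA ts preds cur =
      preds ++ (cur ++ (ts.foldr psStepB ([], [])).1) :: (ts.foldr psStepB ([], [])).2 := by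
  induction ts generalizing preds cur with
  | nil => simp [psLoopA, h]
  | cons t ts ih =>
    by_cases hs : psStartTok t
    · simp only [psLoopA, hs, if_pos, h, ne_eq, not_false_eq_true, if_true, List.foldr_cons,
        psStepB, if_pos hs]
      rw [ih _ [t] (by simp)]
      simp
    · simp only [psLoopA, hs, if_neg, Bool.false_eq_true, not_false_eq_true, List.foldr_cons,
        psStepB, if_neg hs]
      rw [ih _ (cur ++ [t]) (by simp [h])]
      simp

theorem psLoopA_nil_state (ts : List String) :
    psLoopA ts [] [] =
      (if (ts.foldr psStepB ([], [])).1 ≠ [] then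
        (ts.foldr psStepB ([], [])).1 :: (ts.foldr psStepB ([], [])).2
      else (ts.foldr psStepB ([], [])).2) := by
  cases ts with
  | nil => simp [psLoopA]
  | cons t ts =>
    by_cases hs : psStartTok t
    · simp only [psLoopA, hs, if_pos, ne_eq, not_true_eq_false, if_false, List.foldr_cons,
        psStepB, if_pos hs]
      rw [psLoopA_ne ts [] [t] (by simp)]
      simp
    · simp only [psLoopA, hs, Bool.false_eq_true, if_neg, not_false_eq_true, List.foldr_cons,
        psStepB, List.nil_append]
      rw [psLoopA_ne ts [] [t] (by simp)]
      simp

-- ===== VERDICT (by name: the statement is the Claim_ definition above) =====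
theorem parse_statement_spec : Claim_equal_parse_statement := by
  intro statement _ _
  unfold Spec_parse_statement parse_statement parse_statement_alt
  simp [psLoopA_nil_state]
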